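-- pv_equiv track=rewrite | github.com/globus/globus-registered-api | src/globus_registered_api/schema_diff.py | _compute_diff_index_ranges
-- ===== SOURCE A (Python) =====
-- import typing as t
--
-- def _compute_diff_index_ranges(lines: t.Iterable[str]) -> list[tuple[int, int]]:
--     ranges: list[tuple[int, int]] = []
--     current_range: None | tuple[int, int] = None
--
--     for idx, line in enumerate(lines):
--         if not line.startswith("  "):
--             # Line is "important" (addition, removal)
--             if current_range is None:
--                 # Create a new range
--                 current_range = idx, idx
--             else:
--                 # Extend the current range
--                 current_range = (current_range[0], idx)
--
--         else:
--             # Line is not "important"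
--             if current_range is not None:
--                 ranges.append(current_range)
--                 current_range = None
--
--     if current_range is not None:
--         ranges.append(current_range)
--     return ranges
-- ===== SOURCE B (Python) =====
-- import typing as t
--
-- def _compute_diff_index_ranges(lines: t.Iterable[str]) -> list[tuple[int, int]]:
--     rest = list(lines)
--     ranges: list[tuple[int, int]] = []
--     i = 0
--     while rest:
--         if rest[0].startswith("  "):
--             # unimportant line: just skip it
--             rest = rest[1:]
--             i += 1
--         else:
--             # measure the whole run of important lines starting here
--             run = 1
--             while run < len(rest) and not rest[run].startswith("  "):
--                 run += 1
--             ranges.append((i, i + run - 1))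
--             rest = rest[run:]
--             i += run
--     return ranges
-- ===== Notes on version B (the rewrite author's own statement) =====
-- stated objective: alternative
-- what changed: B scans the list emitting one whole run of important lines at a time (skip unimportant line, else measure the full run and append its (start,end) directly), eliminating A's Option-valued current_range accumulator and the post-loop flush.
import Mathlib
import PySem

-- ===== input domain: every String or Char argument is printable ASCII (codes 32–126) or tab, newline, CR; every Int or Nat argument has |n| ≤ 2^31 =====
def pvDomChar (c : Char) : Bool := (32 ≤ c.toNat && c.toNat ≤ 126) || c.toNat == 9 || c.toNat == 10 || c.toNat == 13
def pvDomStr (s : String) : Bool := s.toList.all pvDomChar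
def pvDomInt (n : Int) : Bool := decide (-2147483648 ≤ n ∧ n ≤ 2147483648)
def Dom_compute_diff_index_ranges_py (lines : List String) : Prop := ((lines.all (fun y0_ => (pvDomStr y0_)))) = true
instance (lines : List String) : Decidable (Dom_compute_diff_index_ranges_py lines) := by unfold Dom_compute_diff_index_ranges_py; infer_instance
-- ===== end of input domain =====

-- B emits each run of important lines as one (start,end) pair during a single scan,
-- replacing A's Option-valued current_range accumulator and post-loop flush (alternative decomposition, same cost).


-- ===== PORT A =====
-- one step of A's for-loop: state = (ranges, current_range)
def pvAStep (st : List (Int × Int) × Option (Int × Int)) (p : Int × String) :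
    List (Int × Int) × Option (Int × Int) :=
  if !(PySem.Str.startswith p.2 "  ") then
    match st.2 with
    | none => (st.1, some (p.1, p.1))
    | some c => (st.1, some (c.1, p.1))
  else
    match st.2 with
    | none => st
    | some c => (st.1 ++ [c], none)

def compute_diff_index_ranges_py (lines : List String) : List (Int × Int) :=
  let st := (PySem.List.enumerate lines).foldl pvAStep ([], none)
  match st.2 with
  | none => st.1
  | some c => st.1 ++ [c]

-- ===== PORT B =====
-- "important" = does not start with two spaces
def pvSig (s : String) : Bool := !(PySem.Str.startswith s "  ")

-- B's outer while-loop over the remaining lines; i is the index of the first of them.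
def pvBGo : List String → Int → List (Int × Int)
  | [], _ => []
  | l :: ls, i =>
    if pvSig l then
      -- inner while: run = 1 + length of the important prefix of the rest
      let run : Int := 1 + (ls.takeWhile pvSig).length
      (i, i + run - 1) :: pvBGo (ls.dropWhile pvSig) (i + run)
    else
      pvBGo ls (i + 1)
termination_by ls _ => ls.length
decreasing_by
  · exact Nat.lt_succ_of_le (ls.length_dropWhile_le pvSig)
  · exact Nat.lt_succ_self _

def compute_diff_index_ranges_py_alt (lines : List String) : List (Int × Int) :=
  pvBGo lines 0

-- ===== PRECONDITION & SPEC =====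
def Spec_compute_diff_index_ranges_py (lines : List String) (out : List (Int × Int)) : Prop := out = compute_diff_index_ranges_py_alt lines
instance (lines : List String) (out : List (Int × Int)) : Decidable (Spec_compute_diff_index_ranges_py lines out) := by unfold Spec_compute_diff_index_ranges_py; infer_instance

-- ===== CLAIM (what is proved, stated in full; the proofs are below) =====
def Claim_equal_compute_diff_index_ranges_py : Prop := ∀ (lines : List String), Dom_compute_diff_index_ranges_py lines → Spec_compute_diff_index_ranges_py lines (compute_diff_index_ranges_py lines)

-- ===== LEMMAS AND PROOFS =====

-- what B produces when a run is open with bounds (a, b) and the remaining lines are ls starting at index i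
def pvBCont (a b : Int) : List String → Int → List (Int × Int)
  | [], _ => [(a, b)]
  | l :: ls, i =>
    if pvSig l then
      let run : Int := 1 + (ls.takeWhile pvSig).length
      (a, i + run - 1) :: pvBGo (ls.dropWhile pvSig) (i + run)
    else
      (a, b) :: pvBGo (l :: ls) i

def pvFlush (st : List (Int × Int) × Option (Int × Int)) : List (Int × Int) :=
  match st.2 with
  | none => st.1
  | some c => st.1 ++ [c]

theorem pvBCont_shift (a b : Int) (l : String) (ls : List String) (i : Int)
    (h : pvSig l = true) : pvBCont a b (l :: ls) i = pvBCont a i ls (i + 1) := by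
  cases ls with
  | nil => simp [pvBCont, h, pvBGo]
  | cons l' ls' =>
    by_cases h' : pvSig l' = true
    · simp only [pvBCont, h, h', List.takeWhile_cons, List.dropWhile_cons, if_true]
      congr 1
      · congr 1; simp only [List.length_cons]; push_cast; omega
      · congr 1; simp only [List.length_cons]; push_cast; omega
    · simp [pvBCont, h, h', pvBGo]

theorem pvBGo_open (l : String) (ls : List String) (i : Int) (h : pvSig l = true) :
    pvBGo (l :: ls) i = pvBCont i i ls (i + 1) := by
  cases ls with
  | nil => simp [pvBGo, pvBCont, h]
  | cons l' ls' =>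
    by_cases h' : pvSig l' = true
    · simp only [pvBGo, pvBCont, h, h', List.takeWhile_cons, List.dropWhile_cons, if_true]
      congr 1
      · congr 1; simp only [List.length_cons]; push_cast; omega
      · congr 1; simp only [List.length_cons]; push_cast; omega
    · simp [pvBGo, pvBCont, h, h']

theorem pvMain (ls : List String) :
    ∀ (i : Int) (ranges : List (Int × Int)) (cur : Option (Int × Int)),
      pvFlush ((PySem.List.enumerate ls i).foldl pvAStep (ranges, cur)) =
        ranges ++ (match cur with
          | none => pvBGo ls i
          | some c => pvBCont c.1 c.2 ls i) := by
  induction ls with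
  | nil =>
    intro i ranges cur
    cases cur with
    | none => simp [PySem.List.enumerate_nil, pvFlush, pvBGo]
    | some c => simp [PySem.List.enumerate_nil, pvFlush, pvBCont]
  | cons l ls ih =>
    intro i ranges cur
    rw [PySem.List.enumerate_cons]
    by_cases h : pvSig l = true
    · have hs : (!(PySem.Str.startswith l "  ")) = true := h
      cases cur with
      | none =>
        simp only [List.foldl_cons, pvAStep, hs, if_pos]
        rw [ih (i + 1) ranges (some (i, i))]
        rw [pvBGo_open l ls i h]
      | some c =>
        simp only [List.foldl_cons, pvAStep, hs, if_pos]
        rw [ih (i + 1) ranges (some (c.1, i))]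
        rw [pvBCont_shift c.1 c.2 l ls i h]
    · have hs : (!(PySem.Str.startswith l "  ")) = false := by
        simpa [pvSig] using h
      cases cur with
      | none =>
        simp only [List.foldl_cons, pvAStep, hs, Bool.false_eq_true, if_neg, not_false_iff]
        rw [ih (i + 1) ranges none]
        have : pvBGo (l :: ls) i = pvBGo ls (i + 1) := by
          simp [pvBGo, h]
        rw [this]
      | some c =>
        simp only [List.foldl_cons, pvAStep, hs, Bool.false_eq_true, if_neg, not_false_iff]
        rw [ih (i + 1) (ranges ++ [(c.1, c.2)]) none]
        have : pvBCont c.1 c.2 (l :: ls) i = (c.1, c.2) :: pvBGo (l :: ls) i := by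
          simp [pvBCont, h]
        have h2 : pvBGo (l :: ls) i = pvBGo ls (i + 1) := by simp [pvBGo, h]
        rw [this, h2, List.append_assoc]
        rfl

-- ===== VERDICT (by name: the statement is the Claim_ definition above) =====
theorem compute_diff_index_ranges_py_spec : Claim_equal_compute_diff_index_ranges_py := by
  intro lines _
  unfold Spec_compute_diff_index_ranges_py compute_diff_index_ranges_py compute_diff_index_ranges_py_alt
  have := pvMain lines 0 [] none
  simpa [pvFlush] using this
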